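-- pv_equiv track=rewrite | github.com/kcava2/Computer-Vision-Reliability-Evaluation | reliability_metrics.py | _compute_consecutive_runs
-- ===== SOURCE A (Python) =====
-- def _compute_consecutive_runs(failure_indices):
--     """Return list of consecutive failure run lengths."""
--     if len(failure_indices) == 0:
--         return []
--     runs = []
--     run_len = 1
--     for i in range(1, len(failure_indices)):
--         if failure_indices[i] == failure_indices[i - 1] + 1:
--             run_len += 1
--         else:
--             runs.append(run_len)
--             run_len = 1
--     runs.append(run_len)
--     return runs
-- ===== SOURCE B (Python) =====
-- def _compute_consecutive_runs(failure_indices):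
--     """Return list of consecutive failure run lengths."""
--     if len(failure_indices) == 0:
--         return []
--     n = len(failure_indices)
--     boundaries = [0] + [i for i in range(1, n)
--                         if failure_indices[i] != failure_indices[i - 1] + 1] + [n]
--     return [b - a for a, b in zip(boundaries, boundaries[1:])]
-- ===== Notes on version B (the rewrite author's own statement) =====
-- stated objective: alternative
-- what changed: Replaces the single-pass run-length accumulator with a two-pass scheme: first collect run boundary positions (0, each break index, n), then derive run lengths as differences of adjacent boundaries.
import Mathlib
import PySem

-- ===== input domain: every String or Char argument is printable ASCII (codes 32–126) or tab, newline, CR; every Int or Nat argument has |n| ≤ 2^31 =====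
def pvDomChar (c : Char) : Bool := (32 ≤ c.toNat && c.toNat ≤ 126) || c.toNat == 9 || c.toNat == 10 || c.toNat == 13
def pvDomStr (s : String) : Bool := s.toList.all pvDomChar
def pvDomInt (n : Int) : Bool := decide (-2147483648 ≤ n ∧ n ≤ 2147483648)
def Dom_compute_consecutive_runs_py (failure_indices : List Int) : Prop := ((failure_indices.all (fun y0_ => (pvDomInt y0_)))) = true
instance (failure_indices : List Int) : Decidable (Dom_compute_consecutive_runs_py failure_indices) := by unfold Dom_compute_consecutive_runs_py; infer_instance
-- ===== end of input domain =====

-- B replaces A's single-pass accumulator with a two-pass scheme (collect boundary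
-- positions, then subtract adjacent boundaries); alternative decomposition, same cost.

-- ===== PORT A =====
def compute_consecutive_runs_py (failure_indices : List Int) : List Int :=
  if failure_indices.length = 0 then []
  else
    let st := (PySem.List.pyRange 1 (failure_indices.length : Int) 1).foldl
      (fun (st : List Int × Int) i =>
        if PySem.List.pyGetD failure_indices i 0 = PySem.List.pyGetD failure_indices (i-1) 0 + 1
        then (st.1, st.2 + 1)
        else (st.1 ++ [st.2], 1)) ([], 1)
    st.1 ++ [st.2]

-- ===== PORT B =====
def compute_consecutive_runs_py_alt (failure_indices : List Int) : List Int :=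
  if failure_indices.length = 0 then []
  else
    let bs : List Int :=
      [0] ++ (PySem.List.pyRange 1 (failure_indices.length : Int) 1).filter
        (fun i => !(PySem.List.pyGetD failure_indices i 0 = PySem.List.pyGetD failure_indices (i-1) 0 + 1 : Bool))
      ++ [(failure_indices.length : Int)]
    (bs.zip (bs.drop 1)).map (fun p => p.2 - p.1)

-- ===== PRECONDITION & SPEC =====
def Spec_compute_consecutive_runs_py (failure_indices : List Int) (out : List Int) : Prop := out = compute_consecutive_runs_py_alt failure_indices
instance (failure_indices : List Int) (out : List Int) : Decidable (Spec_compute_consecutive_runs_py failure_indices out) := by unfold Spec_compute_consecutive_runs_py; infer_instance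

-- ===== CLAIM (what is proved, stated in full; the proofs are below) =====
def Claim_equal_compute_consecutive_runs_py : Prop := ∀ (failure_indices : List Int), Dom_compute_consecutive_runs_py failure_indices → Spec_compute_consecutive_runs_py failure_indices (compute_consecutive_runs_py failure_indices)

-- ===== LEMMAS AND PROOFS =====

-- adjacent differences, the shape of B's second pass
def pvDiffs (bs : List Int) : List Int := (bs.zip (bs.drop 1)).map (fun p => p.2 - p.1)

theorem pvDiffs_cons_cons (a b : Int) (t : List Int) :
    pvDiffs (a :: b :: t) = (b - a) :: pvDiffs (b :: t) := rfl

theorem pvDiffs_def (bs : List Int) :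
    (bs.zip (bs.drop 1)).map (fun p => p.2 - p.1) = pvDiffs bs := rfl

theorem pvDiffs_append_last (bs : List Int) (x : Int) (h : bs ≠ []) :
    pvDiffs (bs ++ [x]) = pvDiffs bs ++ [x - bs.getLastD 0] := by
  induction bs with
  | nil => exact absurd rfl h
  | cons a t ih =>
    cases t with
    | nil => simp [pvDiffs]
    | cons b t' =>
      have := ih (by simp)
      simpa [pvDiffs_cons_cons, List.getLastD] using this

-- the loop invariant: after processing indices 1..k, A's accumulator equals the
-- adjacent differences of the boundaries collected so far, and the running length
-- equals the distance from the last boundary.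
theorem pv_inv (xs : List Int) (k : Nat) :
    (PySem.List.pyRange 1 (1 + (k : Int)) 1).foldl
        (fun (st : List Int × Int) i =>
          if PySem.List.pyGetD xs i 0 = PySem.List.pyGetD xs (i-1) 0 + 1
          then (st.1, st.2 + 1) else (st.1 ++ [st.2], 1)) ([], 1)
      = (pvDiffs (0 :: (PySem.List.pyRange 1 (1 + (k : Int)) 1).filter
            (fun i => !(PySem.List.pyGetD xs i 0 = PySem.List.pyGetD xs (i-1) 0 + 1 : Bool))),
         (1 + (k : Int)) - (0 :: (PySem.List.pyRange 1 (1 + (k : Int)) 1).filter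
            (fun i => !(PySem.List.pyGetD xs i 0 = PySem.List.pyGetD xs (i-1) 0 + 1 : Bool))).getLastD 0) := by
  induction k with
  | zero => simp [PySem.List.pyRange_one_eq_nil, pvDiffs]
  | succ k ih =>
    have hsplit : PySem.List.pyRange 1 (1 + ((k + 1 : Nat) : Int)) 1
        = PySem.List.pyRange 1 (1 + (k : Int)) 1 ++ [1 + (k : Int)] := by
      have h : (1 : Int) + ((k + 1 : Nat) : Int) = (1 + (k : Int)) + 1 := by push_cast; ring
      rw [h, PySem.List.pyRange_one_succ_right (by omega)]
    rw [hsplit, List.foldl_append, ih, List.filter_append]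
    by_cases hp : PySem.List.pyGetD xs (1 + (k : Int)) 0
        = PySem.List.pyGetD xs ((1 + (k : Int)) - 1) 0 + 1
    · rw [List.foldl_cons, List.foldl_nil, if_pos hp]
      have hf : List.filter (fun i => !(PySem.List.pyGetD xs i 0 = PySem.List.pyGetD xs (i-1) 0 + 1 : Bool)) [1 + (k : Int)] = [] := by
        simp only [List.filter_cons, List.filter_nil]
        rw [decide_eq_true hp]
        rfl
      rw [hf, List.append_nil, Prod.mk.injEq]
      exact ⟨rfl, by push_cast; ring⟩
    · rw [List.foldl_cons, List.foldl_nil, if_neg hp]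
      have hf : List.filter (fun i => !(PySem.List.pyGetD xs i 0 = PySem.List.pyGetD xs (i-1) 0 + 1 : Bool)) [1 + (k : Int)] = [1 + (k : Int)] := by
        simp only [List.filter_cons, List.filter_nil]
        rw [decide_eq_false hp]
        rfl
      rw [hf, show ((0 : Int) :: ((PySem.List.pyRange 1 (1 + (k : Int)) 1).filter
            (fun i => !(PySem.List.pyGetD xs i 0 = PySem.List.pyGetD xs (i-1) 0 + 1 : Bool)) ++ [1 + (k : Int)]))
          = ((0 : Int) :: (PySem.List.pyRange 1 (1 + (k : Int)) 1).filter
            (fun i => !(PySem.List.pyGetD xs i 0 = PySem.List.pyGetD xs (i-1) 0 + 1 : Bool))) ++ [1 + (k : Int)] from rfl,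
        pvDiffs_append_last _ _ (by simp), List.getLastD_concat, Prod.mk.injEq]
      exact ⟨rfl, by push_cast; ring⟩

-- ===== VERDICT (by name: the statement is the Claim_ definition above) =====
theorem compute_consecutive_runs_py_spec : Claim_equal_compute_consecutive_runs_py := by
  intro xs _
  unfold Spec_compute_consecutive_runs_py compute_consecutive_runs_py compute_consecutive_runs_py_alt
  by_cases h0 : xs.length = 0
  · simp [h0]
  · simp only [h0, if_false]
    have hk : (xs.length : Int) = 1 + ((xs.length - 1 : Nat) : Int) := by
      have h1 : 1 ≤ xs.length := Nat.one_le_iff_ne_zero.mpr h0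
      omega
    have inv := pv_inv xs (xs.length - 1)
    rw [← hk] at inv
    rw [inv, pvDiffs_def, pvDiffs_append_last _ _ (by simp)]
    simp only [List.singleton_append]
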